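-- pv_equiv track=rewrite | github.com/UITlogn/auto_reverse_champion_2025 | A_solve_all.py | decrypt_block_pair
-- ===== SOURCE A (Python) =====
-- MASK32 = 0xFFFFFFFF
--
-- DELTA = 0x61C88647  # 1640531527
--
-- def u32(x):
--     return x & MASK32
--
-- def decrypt_block_pair(v0: int, v1: int, T):
--     v24 = u32((-32 * DELTA) & MASK32)
--     v0 = u32(v0)
--     v1 = u32(v1)
--
--     for _ in range(32):
--         offset = (v24 >> 9) & 0xC
--         idx2 = offset // 4
--         t2 = T[idx2]
--
--         part_v0 = ( (16 * v0) ^ (v0 >> 5) ) & MASK32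
--         expr1 = u32((v0 + part_v0) & MASK32)
--         expr2 = u32(( (v24 + t2) & MASK32 ))
--         v1 = u32((v1 - (expr1 ^ expr2)) & MASK32)
--
--         byte_v24 = v24 & 0xFF
--         idx1 = ( (byte_v24 + 71) & 3 )
--         t1 = T[idx1]
--
--         part_v1 = ( (16 * v1) ^ (v1 >> 5) ) & MASK32
--         expr3 = u32((v1 + part_v1) & MASK32)
--         expr4 = u32((t1 + v24 + DELTA) & MASK32)
--         v0 = u32((v0 - (expr3 ^ expr4)) & MASK32)
--
--         v24 = u32((v24 + DELTA) & MASK32)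
--
--     return v0, v1
-- ===== SOURCE B (Python) =====
-- MASK32 = 0xFFFFFFFF
--
-- DELTA = 0x61C88647  # 1640531527
--
--
-- def decrypt_block_pair(v0: int, v1: int, T):
--     # Pass 1: data-independent key schedule -- the 32 (add2, add4) round constants.
--     sched = []
--     v24 = (-32 * DELTA) & MASK32
--     for _ in range(32):
--         idx2 = ((v24 >> 9) & 0xC) // 4
--         idx1 = ((v24 & 0xFF) + 71) & 3
--         sched.append(((v24 + T[idx2]) & MASK32,
--                       (T[idx1] + v24 + DELTA) & MASK32))
--         v24 = (v24 + DELTA) & MASK32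
--     # Pass 2: data-dependent mixing over the schedule.
--     v0 &= MASK32
--     v1 &= MASK32
--     for add2, add4 in sched:
--         v1 = (v1 - (((v0 + (((16 * v0) ^ (v0 >> 5)) & MASK32)) & MASK32) ^ add2)) & MASK32
--         v0 = (v0 - (((v1 + (((16 * v1) ^ (v1 >> 5)) & MASK32)) & MASK32) ^ add4)) & MASK32
--     return v0, v1
-- ===== Notes on version B (the rewrite author's own statement) =====
-- stated objective: alternative
-- what changed: A interleaves schedule derivation and data mixing in one 32-round loop; B first builds the 32-entry data-independent key schedule (add2, add4 pairs) in a separate pass, then runs a pure mixing pass over that table, separating the key schedule from the data path.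
import Mathlib
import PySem

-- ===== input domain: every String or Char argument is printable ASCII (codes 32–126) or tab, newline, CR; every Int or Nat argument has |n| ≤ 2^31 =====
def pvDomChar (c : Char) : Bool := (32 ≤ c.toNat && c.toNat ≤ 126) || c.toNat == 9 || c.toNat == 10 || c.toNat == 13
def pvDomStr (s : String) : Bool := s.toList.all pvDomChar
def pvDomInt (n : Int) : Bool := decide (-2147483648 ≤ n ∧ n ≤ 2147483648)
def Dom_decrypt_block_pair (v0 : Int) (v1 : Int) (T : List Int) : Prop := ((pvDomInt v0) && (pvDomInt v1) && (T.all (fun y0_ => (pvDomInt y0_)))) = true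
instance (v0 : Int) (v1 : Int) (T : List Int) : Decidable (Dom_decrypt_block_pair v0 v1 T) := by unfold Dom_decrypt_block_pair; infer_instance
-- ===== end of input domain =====

-- B splits A's single 32-round loop into a key-schedule pass (building the 32 (add2, add4)
-- round constants) followed by a separate mixing pass over that table ('alternative').

-- module constants (shared by both Python versions)
def pvMASK32 : Int := 0xFFFFFFFF
def pvDELTA : Int := 0x61C88647

-- ===== PORT A =====
def pvU32 (x : Int) : Int := PySem.Int.band x pvMASK32

-- A's loop body (T[idx] is PySem.List.pyGetD with default 0: Pre_ guarantees the index is in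
-- range, exactly where Python would not raise IndexError)
def pvARound (T : List Int) (st : Int × Int × Int) (_i : Int) : Int × Int × Int :=
  let v0 := st.1
  let v1 := st.2.1
  let v24 := st.2.2
  let offset := PySem.Int.band (v24 >>> (9:Nat)) 0xC
  let idx2 := PySem.Int.floordiv offset 4
  let t2 := PySem.List.pyGetD T idx2 0
  let part_v0 := PySem.Int.band (PySem.Int.bxor (16 * v0) (v0 >>> (5:Nat))) pvMASK32
  let expr1 := pvU32 (PySem.Int.band (v0 + part_v0) pvMASK32)
  let expr2 := pvU32 (PySem.Int.band (v24 + t2) pvMASK32)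
  let v1' := pvU32 (PySem.Int.band (v1 - PySem.Int.bxor expr1 expr2) pvMASK32)
  let byte_v24 := PySem.Int.band v24 0xFF
  let idx1 := PySem.Int.band (byte_v24 + 71) 3
  let t1 := PySem.List.pyGetD T idx1 0
  let part_v1 := PySem.Int.band (PySem.Int.bxor (16 * v1') (v1' >>> (5:Nat))) pvMASK32
  let expr3 := pvU32 (PySem.Int.band (v1' + part_v1) pvMASK32)
  let expr4 := pvU32 (PySem.Int.band (t1 + v24 + pvDELTA) pvMASK32)
  let v0' := pvU32 (PySem.Int.band (v0 - PySem.Int.bxor expr3 expr4) pvMASK32)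
  let v24' := pvU32 (PySem.Int.band (v24 + pvDELTA) pvMASK32)
  (v0', v1', v24')

def decrypt_block_pair (v0 : Int) (v1 : Int) (T : List Int) : Int × Int :=
  let v24 := pvU32 (PySem.Int.band ((-32) * pvDELTA) pvMASK32)
  let v0' := pvU32 v0
  let v1' := pvU32 v1
  let st := (PySem.List.pyRange 0 32 1).foldl (pvARound T) (v0', v1', v24)
  (st.1, st.2.1)

-- ===== PORT B =====
-- pass 1: the schedule loop (n remaining rounds, current v24), collecting (add2, add4)
def pvSched : Nat → Int → List Int → List (Int × Int)
  | 0, _, _ => []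
  | Nat.succ n, v24, T =>
    let idx2 := PySem.Int.floordiv (PySem.Int.band (v24 >>> (9:Nat)) 0xC) 4
    let idx1 := PySem.Int.band (PySem.Int.band v24 0xFF + 71) 3
    (PySem.Int.band (v24 + PySem.List.pyGetD T idx2 0) pvMASK32,
     PySem.Int.band (PySem.List.pyGetD T idx1 0 + v24 + pvDELTA) pvMASK32)
      :: pvSched n (PySem.Int.band (v24 + pvDELTA) pvMASK32) T

-- pass 2: one mixing step over a schedule entry
def pvMix (p : Int × Int) (ad : Int × Int) : Int × Int :=
  let v1' := PySem.Int.band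
    (p.2 - PySem.Int.bxor
      (PySem.Int.band (p.1 + PySem.Int.band (PySem.Int.bxor (16 * p.1) (p.1 >>> (5:Nat))) pvMASK32) pvMASK32)
      ad.1) pvMASK32
  let v0' := PySem.Int.band
    (p.1 - PySem.Int.bxor
      (PySem.Int.band (v1' + PySem.Int.band (PySem.Int.bxor (16 * v1') (v1' >>> (5:Nat))) pvMASK32) pvMASK32)
      ad.2) pvMASK32
  (v0', v1')

def decrypt_block_pair_alt (v0 : Int) (v1 : Int) (T : List Int) : Int × Int :=
  let sched := pvSched 32 (PySem.Int.band ((-32) * pvDELTA) pvMASK32) T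
  sched.foldl pvMix (PySem.Int.band v0 pvMASK32, PySem.Int.band v1 pvMASK32)

-- ===== PRECONDITION & SPEC =====
-- A indexes T at every value 0..3 across the 32 rounds, so it raises IndexError exactly when
-- len(T) < 4; Pre_ admits the lists of length ≥ 4, exactly where A returns.
def Pre_decrypt_block_pair (v0 : Int) (v1 : Int) (T : List Int) : Prop := 4 ≤ T.length
instance (v0 : Int) (v1 : Int) (T : List Int) : Decidable (Pre_decrypt_block_pair v0 v1 T) := by unfold Pre_decrypt_block_pair; infer_instance
def pvWitness_decrypt_block_pair : Int × Int × List Int := (1, 2, [3, 4, 5, 6])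

def Spec_decrypt_block_pair (v0 : Int) (v1 : Int) (T : List Int) (out : Int × Int) : Prop := out = decrypt_block_pair_alt v0 v1 T
instance (v0 : Int) (v1 : Int) (T : List Int) (out : Int × Int) : Decidable (Spec_decrypt_block_pair v0 v1 T out) := by unfold Spec_decrypt_block_pair; infer_instance

-- ===== CLAIM (what is proved, stated in full; the proofs are below) =====
def Claim_equal_decrypt_block_pair : Prop := ∀ (v0 : Int) (v1 : Int) (T : List Int), Dom_decrypt_block_pair v0 v1 T → Pre_decrypt_block_pair v0 v1 T → Spec_decrypt_block_pair v0 v1 T (decrypt_block_pair v0 v1 T)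

-- ===== LEMMAS AND PROOFS =====

-- masking an already 32-bit-masked value is a no-op
lemma pv_mask_idem (x : Int) :
    PySem.Int.band (PySem.Int.band x pvMASK32) pvMASK32 = PySem.Int.band x pvMASK32 := by
  unfold pvMASK32
  have h0 : 0 ≤ PySem.Int.band x 0xFFFFFFFF := by
    rw [PySem.Int.band_comm]; exact PySem.Int.band_nonneg_of_nonneg_left _ (by norm_num)
  have hle : PySem.Int.band x 0xFFFFFFFF ≤ 0xFFFFFFFF := by
    unfold PySem.Int.band
    split_ifs with h1 h2 h2
    · have h := Nat.and_le_right (n := x.toNat) (m := (0xFFFFFFFF:Int).toNat); omega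
    · omega
    · have h := Nat.sub_le ((0xFFFFFFFF:Int)).toNat (((0xFFFFFFFF:Int)).toNat &&& (-x - 1).toNat); omega
    · omega
  rw [PySem.Int.band_of_nonneg h0 (by norm_num)]
  have hand : (PySem.Int.band x 0xFFFFFFFF).toNat &&& ((0xFFFFFFFF:Int)).toNat
      = (PySem.Int.band x 0xFFFFFFFF).toNat := by
    have ht : ((0xFFFFFFFF:Int)).toNat = 2 ^ 32 - 1 := rfl
    rw [ht, Nat.and_two_pow_sub_one_eq_mod, Nat.mod_eq_of_lt (by omega)]
  rw [hand]; omega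

-- one round of A equals one mixing step over the schedule entry derived from the same v24
lemma pv_round_eq (T : List Int) (i c v0 v1 : Int) :
    pvARound T (v0, v1, c) i =
      ((pvMix (v0, v1)
          (PySem.Int.band (c + PySem.List.pyGetD T (PySem.Int.floordiv (PySem.Int.band (c >>> (9:Nat)) 0xC) 4) 0) pvMASK32,
           PySem.Int.band (PySem.List.pyGetD T (PySem.Int.band (PySem.Int.band c 0xFF + 71) 3) 0 + c + pvDELTA) pvMASK32)).1,
       (pvMix (v0, v1)
          (PySem.Int.band (c + PySem.List.pyGetD T (PySem.Int.floordiv (PySem.Int.band (c >>> (9:Nat)) 0xC) 4) 0) pvMASK32,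
           PySem.Int.band (PySem.List.pyGetD T (PySem.Int.band (PySem.Int.band c 0xFF + 71) 3) 0 + c + pvDELTA) pvMASK32)).2,
       PySem.Int.band (c + pvDELTA) pvMASK32) := by
  simp only [pvARound, pvMix, pvU32, pv_mask_idem]

-- the whole loop: A's fold projected to (v0, v1) is B's mixing fold over the schedule
lemma pv_fold_eq (T : List Int) (l : List Int) :
    ∀ (v0 v1 c : Int),
      ((l.foldl (pvARound T) (v0, v1, c)).1, (l.foldl (pvARound T) (v0, v1, c)).2.1)
        = (pvSched l.length c T).foldl pvMix (v0, v1) := by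
  induction l with
  | nil => intro v0 v1 c; rfl
  | cons a l ih =>
    intro v0 v1 c
    simp only [List.foldl_cons, List.length_cons, pvSched, pv_round_eq]
    exact ih _ _ _

-- ===== VERDICT (by name: the statement is the Claim_ definition above) =====
theorem decrypt_block_pair_spec : Claim_equal_decrypt_block_pair := by
  intro v0 v1 T _ _
  unfold Spec_decrypt_block_pair decrypt_block_pair decrypt_block_pair_alt
  have h := pv_fold_eq T (PySem.List.pyRange 0 32 1) (pvU32 v0) (pvU32 v1)
    (pvU32 (PySem.Int.band ((-32) * pvDELTA) pvMASK32))
  have hlen : (PySem.List.pyRange 0 32 1).length = 32 := by decide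
  rw [hlen] at h
  simpa [pvU32, pv_mask_idem] using h
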